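-- pv_equiv track=rewrite | github.com/ThorD125/schoolWork | programming fundamentals S1 Python/exercises/topic06_functions/assignment07.py | line
-- ===== SOURCE A (Python) =====
-- def line(stars, filled=True, shift=0, first_sign="*"):
--     line = ""
--     for i in range(shift):
--         line += " "
--
--     for i in range(stars):
--         if i == 0 or i == stars - 1:
--             line += first_sign
--         elif filled:
--             line += first_sign
--         else:
--             line += " "
--
--     return line
-- ===== SOURCE B (Python) =====
-- def line(stars, filled=True, shift=0, first_sign="*"):
--     margin = " " * shift
--     if stars <= 0:
--         body = ""
--     elif stars == 1:
--         body = first_sign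
--     elif filled:
--         body = first_sign * stars
--     else:
--         body = first_sign + " " * (stars - 2) + first_sign
--     return margin + body
-- ===== Notes on version B (the rewrite author's own statement) =====
-- stated objective: simpler
-- what changed: Replaces the per-character index loop with positional i==0/i==stars-1 branching by direct concatenation of whole segments (margin, then an empty/single/filled/hollow body built with string multiplication).
import Mathlib
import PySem

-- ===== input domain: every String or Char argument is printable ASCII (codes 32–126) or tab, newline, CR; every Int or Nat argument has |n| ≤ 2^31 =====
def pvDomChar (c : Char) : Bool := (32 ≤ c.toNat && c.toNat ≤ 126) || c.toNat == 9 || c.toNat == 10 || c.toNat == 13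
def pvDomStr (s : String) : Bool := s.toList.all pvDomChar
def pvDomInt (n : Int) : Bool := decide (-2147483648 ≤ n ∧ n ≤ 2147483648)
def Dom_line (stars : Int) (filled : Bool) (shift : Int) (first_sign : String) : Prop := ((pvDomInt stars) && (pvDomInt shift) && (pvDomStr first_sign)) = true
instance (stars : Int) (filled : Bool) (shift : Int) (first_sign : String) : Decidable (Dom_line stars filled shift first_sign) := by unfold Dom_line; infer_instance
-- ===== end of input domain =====

-- B builds the line by concatenating whole segments (margin + empty/single/filled/hollow body)
-- instead of A's per-character loop with positional branching; objective: simpler.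


-- ===== PORT A =====
def line (stars : Int) (filled : Bool) (shift : Int) (first_sign : String) : String :=
  -- line = ""; for i in range(shift): line += " "
  let l0 : String := (PySem.List.pyRange 0 shift 1).foldl (fun acc _ => acc ++ " ") ""
  -- for i in range(stars): …
  (PySem.List.pyRange 0 stars 1).foldl (fun acc i =>
    if i = 0 ∨ i = stars - 1 then acc ++ first_sign
    else if filled then acc ++ first_sign
    else acc ++ " ") l0

-- ===== PORT B =====
-- Python's s * n (empty for n ≤ 0)
def pyRepeat (s : String) (n : Int) : String := String.join (List.replicate n.toNat s)

def line_alt (stars : Int) (filled : Bool) (shift : Int) (first_sign : String) : String :=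
  let margin := pyRepeat " " shift
  let body :=
    if stars ≤ 0 then ""
    else if stars = 1 then first_sign
    else if filled then pyRepeat first_sign stars
    else first_sign ++ pyRepeat " " (stars - 2) ++ first_sign
  margin ++ body

-- ===== PRECONDITION & SPEC =====
def Spec_line (stars : Int) (filled : Bool) (shift : Int) (first_sign : String) (out : String) : Prop := out = line_alt stars filled shift first_sign
instance (stars : Int) (filled : Bool) (shift : Int) (first_sign : String) (out : String) : Decidable (Spec_line stars filled shift first_sign out) := by unfold Spec_line; infer_instance

-- ===== CLAIM (what is proved, stated in full; the proofs are below) =====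
def Claim_equal_line : Prop := ∀ (stars : Int) (filled : Bool) (shift : Int) (first_sign : String), Dom_line stars filled shift first_sign → Spec_line stars filled shift first_sign (line stars filled shift first_sign)

-- ===== LEMMAS AND PROOFS =====

theorem join_cons (s : String) (l : List String) : String.join (s :: l) = s ++ String.join l := by
  simp [String.join_eq]

-- a foldl that only appends equals the starting string followed by the joined pieces
theorem foldl_append_join {α : Type} (l : List α) (g : α → String) (acc : String) :
    l.foldl (fun a x => a ++ g x) acc = acc ++ String.join (l.map g) := by
  induction l generalizing acc with
  | nil => simp [String.join_eq]
  | cons x xs ih => simp [ih, join_cons, String.append_assoc]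

theorem join_map_const {α : Type} (l : List α) (s : String) :
    String.join (l.map (fun _ => s)) = String.join (List.replicate l.length s) := by
  simp [List.map_const']

-- push the append in A's loop body outside the branch
theorem branch_push (stars : Int) (filled : Bool) (first_sign : String) (acc : String) (i : Int) :
    (if i = 0 ∨ i = stars - 1 then acc ++ first_sign
     else if filled = true then acc ++ first_sign else acc ++ " ")
    = acc ++ (if i = 0 ∨ i = stars - 1 then first_sign
              else if filled = true then first_sign else " ") := by
  split_ifs <;> rfl

theorem line_margin (shift : Int) :
    (PySem.List.pyRange 0 shift 1).foldl (fun acc _ => acc ++ " ") "" = pyRepeat " " shift := by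
  rw [foldl_append_join, join_map_const]
  simp [pyRepeat, PySem.List.length_pyRange_one]

-- ===== VERDICT (by name: the statement is the Claim_ definition above) =====
theorem line_spec : Claim_equal_line := by
  intro stars filled shift first_sign _
  show line stars filled shift first_sign = line_alt stars filled shift first_sign
  simp only [line, line_alt, branch_push]
  rw [line_margin, foldl_append_join]
  congr 1
  by_cases h0 : stars ≤ 0
  · simp [PySem.List.pyRange_one_eq_nil (by omega : stars ≤ 0), h0, String.join_eq]
  · by_cases h1 : stars = 1
    · subst h1
      have hr : PySem.List.pyRange 0 1 1 = [0] := by decide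
      simp [hr, String.join_eq]
    · have h2 : (2 : Int) ≤ stars := by omega
      simp only [if_neg h0, if_neg h1]
      by_cases hf : filled
      · subst hf
        have hmap : (PySem.List.pyRange 0 stars 1).map (fun i =>
            if i = 0 ∨ i = stars - 1 then first_sign else if true = true then first_sign else " ")
            = (PySem.List.pyRange 0 stars 1).map (fun _ => first_sign) := by
          apply List.map_congr_left
          intro i _
          split_ifs <;> simp_all
        rw [hmap, join_map_const]
        simp [pyRepeat, PySem.List.length_pyRange_one]
      · simp only [Bool.not_eq_true] at hf
        subst hf
        have hsplit : PySem.List.pyRange 0 stars 1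
            = 0 :: (PySem.List.pyRange 1 (stars - 1) 1 ++ [stars - 1]) := by
          rw [PySem.List.pyRange_one_cons (by omega : (0:Int) < stars)]
          norm_num
          have h3 := PySem.List.pyRange_one_succ_right (by omega : (1:Int) ≤ stars - 1)
          rw [show stars - 1 + 1 = stars by omega] at h3
          rw [h3]
        have hmid : (PySem.List.pyRange 1 (stars - 1) 1).map (fun i =>
            if i = 0 ∨ i = stars - 1 then first_sign else if (false : Bool) = true then first_sign else " ")
            = (PySem.List.pyRange 1 (stars - 1) 1).map (fun _ => " ") := by
          apply List.map_congr_left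
          intro i hi
          rw [PySem.List.mem_pyRange_one] at hi
          have hni : ¬ (i = 0 ∨ i = stars - 1) := by omega
          simp [hni]
        rw [hsplit]
        simp only [List.map_cons, List.map_append, hmid, join_map_const]
        have hlen : (PySem.List.pyRange 1 (stars - 1) 1).length = (stars - 2).toNat := by
          rw [PySem.List.length_pyRange_one]; omega
        simp [hlen, String.join_eq, pyRepeat, String.append_assoc]
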